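-- pv_equiv track=rewrite | github.com/eludum/proclogic_api | app/util/publication_utils/nuts_codes.py | check_if_publication_is_in_your_region
-- ===== SOURCE A (Python) =====
-- from typing import List
--
-- def check_if_publication_is_in_your_region(company_regions: List[str], publication_regions: List[str]) -> bool:
--     if not company_regions or not publication_regions:
--         return False
--
--     # Create sets for quick lookup
--     company_region_set = set(company_regions)
--     publication_region_set = set(publication_regions)
--
--     # Direct match
--     if company_region_set.intersection(publication_region_set):
--         return True
--
--     # Check parent-child relationships
--     for pub_region in publication_regions:
--         # Check if any company region is a parent of this publication region
--         for company_region in company_regions: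
--             # A region is a parent if it's a prefix of the publication region
--             # and the publication region is longer (more specific)
--             if pub_region.startswith(company_region) and len(pub_region) > len(company_region):
--                 return True
--
--             # Also check the reverse - if company has a specific region that belongs to a broader
--             # publication region
--             if company_region.startswith(pub_region) and len(company_region) > len(pub_region):
--                 return True
--
--     return False
-- ===== SOURCE B (Python) =====
-- def check_if_publication_is_in_your_region(company_regions, publication_regions):
--     comp = set(company_regions)
--     pub = set(publication_regions)
--     # any prefix (including the whole string, covering exact matches) of a
--     # publication region that is a company region
--     for r in publication_regions:
--         for k in range(len(r) + 1):
--             if r[:k] in comp: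
--                 return True
--     # any proper prefix of a company region that is a publication region
--     for r in company_regions:
--         for k in range(len(r)):
--             if r[:k] in pub:
--                 return True
--     return False
-- ===== Notes on version B (the rewrite author's own statement) =====
-- stated objective: alternative
-- what changed: Instead of A's pairwise loop comparing every publication region with every company region by startswith, B hashes both lists into sets once and, for each region, probes its prefixes (all prefixes of publication regions, proper prefixes of company regions) for membership in the opposite set.
import Mathlib
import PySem

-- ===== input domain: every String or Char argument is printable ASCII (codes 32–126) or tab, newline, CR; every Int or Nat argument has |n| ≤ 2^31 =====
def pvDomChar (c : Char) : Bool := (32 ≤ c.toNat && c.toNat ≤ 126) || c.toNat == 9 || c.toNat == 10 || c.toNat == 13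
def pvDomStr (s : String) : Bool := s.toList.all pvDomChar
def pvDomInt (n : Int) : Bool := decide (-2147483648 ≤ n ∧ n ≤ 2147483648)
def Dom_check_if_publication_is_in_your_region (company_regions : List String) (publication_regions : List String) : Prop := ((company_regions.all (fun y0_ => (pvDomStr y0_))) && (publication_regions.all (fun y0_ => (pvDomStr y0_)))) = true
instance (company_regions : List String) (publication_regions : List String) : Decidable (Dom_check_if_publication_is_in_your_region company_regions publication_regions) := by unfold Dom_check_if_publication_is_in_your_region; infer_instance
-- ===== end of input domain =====

-- B replaces A's pairwise startswith scan over all (company, publication) pairs by hashing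
-- both region lists into sets and probing each region's prefixes against the opposite set
-- (objective: alternative algorithm, same measured cost).

-- ===== PORT A =====
-- inner 'for company_region in company_regions' loop with its two early returns
def pvAInner (pub_region : String) : List String → Bool
  | [] => false
  | c :: rest =>
    if PySem.Str.startswith pub_region c
        && decide (PySem.Str.len c < PySem.Str.len pub_region) then true
    else if PySem.Str.startswith c pub_region
        && decide (PySem.Str.len pub_region < PySem.Str.len c) then true
    else pvAInner pub_region rest

-- outer 'for pub_region in publication_regions' loop
def pvAOuter (company_regions : List String) : List String → Bool
  | [] => false
  | p :: rest =>
    if pvAInner p company_regions then true else pvAOuter company_regions rest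

def check_if_publication_is_in_your_region (company_regions : List String) (publication_regions : List String) : Bool :=
  if company_regions.isEmpty || publication_regions.isEmpty then false
  else
    let company_region_set := PySem.Set.ofList company_regions
    let publication_region_set := PySem.Set.ofList publication_regions
    if !(PySem.Set.inter company_region_set publication_region_set).isEmpty then true
    else pvAOuter company_regions publication_regions

-- ===== PORT B =====
-- 'for k in ks: if r[:k] in target: return True' inner loop
def pvBScan (r : String) (target : PySem.Set String) : List Int → Bool
  | [] => false
  | k :: rest =>
    if PySem.Set.contains target (PySem.Str.slice r none (some k)) then true
    else pvBScan r target rest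

-- first loop: every prefix (incl. the whole string) of a publication region, probed in comp
def pvBPubLoop (comp : PySem.Set String) : List String → Bool
  | [] => false
  | r :: rest =>
    if pvBScan r comp (PySem.List.pyRange 0 ((PySem.Str.len r : Int) + 1)) then true
    else pvBPubLoop comp rest

-- second loop: every proper prefix of a company region, probed in pub
def pvBCompLoop (pub : PySem.Set String) : List String → Bool
  | [] => false
  | r :: rest =>
    if pvBScan r pub (PySem.List.pyRange 0 (PySem.Str.len r : Int)) then true
    else pvBCompLoop pub rest

def check_if_publication_is_in_your_region_alt (company_regions : List String) (publication_regions : List String) : Bool :=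
  let comp := PySem.Set.ofList company_regions
  let pub := PySem.Set.ofList publication_regions
  if pvBPubLoop comp publication_regions then true
  else pvBCompLoop pub company_regions

-- ===== PRECONDITION & SPEC =====
def Spec_check_if_publication_is_in_your_region (company_regions : List String) (publication_regions : List String) (out : Bool) : Prop := out = check_if_publication_is_in_your_region_alt company_regions publication_regions
instance (company_regions : List String) (publication_regions : List String) (out : Bool) : Decidable (Spec_check_if_publication_is_in_your_region company_regions publication_regions out) := by unfold Spec_check_if_publication_is_in_your_region; infer_instance

-- ===== CLAIM (what is proved, stated in full; the proofs are below) =====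
def Claim_equal_check_if_publication_is_in_your_region : Prop := ∀ (company_regions : List String) (publication_regions : List String), Dom_check_if_publication_is_in_your_region company_regions publication_regions → Spec_check_if_publication_is_in_your_region company_regions publication_regions (check_if_publication_is_in_your_region company_regions publication_regions)

-- ===== LEMMAS AND PROOFS =====

-- both programs decide: some company region and publication region are prefix-related
def pvRel (c p : String) : Prop := c.toList <+: p.toList ∨ p.toList <+: c.toList

lemma pvAInner_eq_any (p : String) (cs : List String) :
    pvAInner p cs = cs.any (fun c =>
      (PySem.Str.startswith p c && decide (PySem.Str.len c < PySem.Str.len p)) ||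
      (PySem.Str.startswith c p && decide (PySem.Str.len p < PySem.Str.len c))) := by
  induction cs with
  | nil => rfl
  | cons c rest ih =>
    simp only [pvAInner, List.any_cons]
    cases h1 : (PySem.Str.startswith p c && decide (PySem.Str.len c < PySem.Str.len p)) with
    | true => simp
    | false =>
      cases h2 : (PySem.Str.startswith c p && decide (PySem.Str.len p < PySem.Str.len c)) with
      | true => simp
      | false => simp [ih]

lemma pvAInner_iff (p : String) (cs : List String) :
    pvAInner p cs = true ↔
      ∃ c ∈ cs, (c.toList <+: p.toList ∧ c.toList.length < p.toList.length) ∨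
                (p.toList <+: c.toList ∧ p.toList.length < c.toList.length) := by
  rw [pvAInner_eq_any, List.any_eq_true]
  refine exists_congr fun c => and_congr_right fun _ => ?_
  simp [PySem.Chars.startswith_iff]

lemma pvAOuter_eq_any (cs ps : List String) :
    pvAOuter cs ps = ps.any (fun p => pvAInner p cs) := by
  induction ps with
  | nil => rfl
  | cons p rest ih =>
    simp only [pvAOuter, List.any_cons]
    cases h : pvAInner p cs with
    | true => simp
    | false => simp [ih]

lemma pvA_iff (cs ps : List String) :
    check_if_publication_is_in_your_region cs ps = true ↔
      ∃ c ∈ cs, ∃ p ∈ ps, pvRel c p := by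
  unfold check_if_publication_is_in_your_region
  show (if (cs.isEmpty || ps.isEmpty) = true then false
        else if (!(PySem.Set.inter (PySem.Set.ofList cs) (PySem.Set.ofList ps)).isEmpty) = true
          then true else pvAOuter cs ps) = true ↔ _
  split_ifs with hemp hint
  · simp only [Bool.or_eq_true, List.isEmpty_iff] at hemp
    constructor
    · intro h; simp at h
    · rintro ⟨c, hc, p, hp, -⟩
      rcases hemp with rfl | rfl <;> simp_all
  · simp only [true_iff]
    rw [Bool.not_eq_true', List.isEmpty_eq_false_iff_exists_mem] at hint
    rcases hint with ⟨x, hx⟩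
    rcases (PySem.Set.mem_inter _ _ _).mp hx with ⟨hx1, hx2⟩
    exact ⟨x, (PySem.Set.mem_ofList _ _).mp hx1, x, (PySem.Set.mem_ofList _ _).mp hx2,
      Or.inl (List.prefix_refl _)⟩
  · simp only [Bool.not_eq_true, Bool.not_eq_false', List.isEmpty_iff] at hint
    rw [pvAOuter_eq_any, List.any_eq_true]
    constructor
    · rintro ⟨p, hp, hin⟩
      rcases (pvAInner_iff p cs).mp hin with ⟨c, hc, hrel⟩
      exact ⟨c, hc, p, hp, hrel.imp (fun h => h.1) (fun h => h.1)⟩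
    · rintro ⟨c, hc, p, hp, hrel⟩
      refine ⟨p, hp, (pvAInner_iff p cs).mpr ⟨c, hc, ?_⟩⟩
      have hne : ∀ x, x ∈ cs → x ∈ ps → False := by
        intro x h1 h2
        have : x ∈ PySem.Set.inter (PySem.Set.ofList cs) (PySem.Set.ofList ps) :=
          (PySem.Set.mem_inter _ _ _).mpr
            ⟨(PySem.Set.mem_ofList _ _).mpr h1, (PySem.Set.mem_ofList _ _).mpr h2⟩
        rw [hint] at this; simp at this
      rcases hrel with hpre | hpre
      · rcases Nat.lt_or_ge c.toList.length p.toList.length with hlt | hge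
        · exact Or.inl ⟨hpre, hlt⟩
        · exact absurd hc (fun hc => hne c hc
            (String.toList_inj.mp (List.IsPrefix.eq_of_length_le hpre hge) ▸ hp))
      · rcases Nat.lt_or_ge p.toList.length c.toList.length with hlt | hge
        · exact Or.inr ⟨hpre, hlt⟩
        · exact absurd hp (fun hp => hne c hc
            ((String.toList_inj.mp (List.IsPrefix.eq_of_length_le hpre hge)).symm ▸ hp))

lemma pvBScan_eq_any (r : String) (target : PySem.Set String) (ks : List Int) :
    pvBScan r target ks =
      ks.any (fun k => PySem.Set.contains target (PySem.Str.slice r none (some k))) := by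
  induction ks with
  | nil => rfl
  | cons k rest ih =>
    simp only [pvBScan, List.any_cons]
    cases h : PySem.Set.contains target (PySem.Str.slice r none (some k)) with
    | true => simp
    | false => simp [ih]

-- a prefix probe over range(n) hits exactly the members that are prefixes of r of length < n
lemma pvScan_range_iff (r : String) (xs : List String) (n : Nat) :
    pvBScan r (PySem.Set.ofList xs) (PySem.List.pyRange 0 (n : Int)) = true ↔
      ∃ x ∈ xs, x.toList <+: r.toList ∧ x.toList.length < n := by
  rw [pvBScan_eq_any, List.any_eq_true]
  constructor
  · rintro ⟨k, hk, hm⟩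
    rw [PySem.Set.contains_iff, PySem.Set.mem_ofList] at hm
    rcases PySem.List.mem_pyRange_one.mp hk with ⟨hk0, hkn⟩
    obtain ⟨m, rfl⟩ : ∃ m : Nat, k = (m : Int) := ⟨k.toNat, (Int.toNat_of_nonneg hk0).symm⟩
    have ht : (PySem.Str.slice r none (some (m : Int))).toList = r.toList.take m := by
      simp [PySem.List.slice_to_natCast]
    refine ⟨_, hm, ?_, ?_⟩
    · rw [ht]; exact List.take_prefix m r.toList
    · rw [ht]
      calc (r.toList.take m).length ≤ m := by simp
        _ < n := by exact_mod_cast hkn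
  · rintro ⟨x, hx, hpre, hlen⟩
    refine ⟨(x.toList.length : Int),
      PySem.List.mem_pyRange_one.mpr ⟨by positivity, by exact_mod_cast hlen⟩, ?_⟩
    rw [PySem.Set.contains_iff, PySem.Set.mem_ofList]
    have ht : (PySem.Str.slice r none (some (x.toList.length : Int))).toList
        = r.toList.take x.toList.length := by
      simp [PySem.List.slice_to_natCast]
    have : PySem.Str.slice r none (some (x.toList.length : Int)) = x :=
      String.toList_inj.mp (ht.trans (List.prefix_iff_eq_take.mp hpre).symm)
    rw [this]; exact hx

lemma pvBPubLoop_iff (cs ps : List String) :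
    pvBPubLoop (PySem.Set.ofList cs) ps = true ↔
      ∃ p ∈ ps, ∃ c ∈ cs, c.toList <+: p.toList := by
  have hloop : pvBPubLoop (PySem.Set.ofList cs) ps =
      ps.any (fun r => pvBScan r (PySem.Set.ofList cs)
        (PySem.List.pyRange 0 ((PySem.Str.len r : Int) + 1))) := by
    induction ps with
    | nil => rfl
    | cons p rest ih =>
      simp only [pvBPubLoop, List.any_cons]
      cases h : pvBScan p (PySem.Set.ofList cs) (PySem.List.pyRange 0 ((PySem.Str.len p : Int) + 1)) with
      | true => simp
      | false => simp [ih]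
  rw [hloop, List.any_eq_true]
  refine exists_congr fun p => and_congr_right fun _ => ?_
  have hn : ((PySem.Str.len p : Int) + 1) = ((p.toList.length + 1 : Nat) : Int) := by
    simp [PySem.Str.len_eq]
  rw [hn, pvScan_range_iff]
  constructor
  · rintro ⟨x, hx, hpre, -⟩; exact ⟨x, hx, hpre⟩
  · rintro ⟨x, hx, hpre⟩; exact ⟨x, hx, hpre, Nat.lt_succ_of_le hpre.length_le⟩

lemma pvBCompLoop_iff (ps cs : List String) :
    pvBCompLoop (PySem.Set.ofList ps) cs = true ↔
      ∃ c ∈ cs, ∃ p ∈ ps, p.toList <+: c.toList ∧ p.toList.length < c.toList.length := by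
  have hloop : pvBCompLoop (PySem.Set.ofList ps) cs =
      cs.any (fun r => pvBScan r (PySem.Set.ofList ps)
        (PySem.List.pyRange 0 (PySem.Str.len r : Int))) := by
    induction cs with
    | nil => rfl
    | cons c rest ih =>
      simp only [pvBCompLoop, List.any_cons]
      cases h : pvBScan c (PySem.Set.ofList ps) (PySem.List.pyRange 0 (PySem.Str.len c : Int)) with
      | true => simp
      | false => simp [ih]
  rw [hloop, List.any_eq_true]
  refine exists_congr fun c => and_congr_right fun _ => ?_
  have hn : ((PySem.Str.len c : Int)) = ((c.toList.length : Nat) : Int) := by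
    simp [PySem.Str.len_eq]
  rw [hn, pvScan_range_iff]

lemma pvB_iff (cs ps : List String) :
    check_if_publication_is_in_your_region_alt cs ps = true ↔
      ∃ c ∈ cs, ∃ p ∈ ps, pvRel c p := by
  unfold check_if_publication_is_in_your_region_alt
  show (if pvBPubLoop (PySem.Set.ofList cs) ps = true then true
        else pvBCompLoop (PySem.Set.ofList ps) cs) = true ↔ _
  split_ifs with h1
  · simp only [true_iff]
    rcases (pvBPubLoop_iff cs ps).mp h1 with ⟨p, hp, c, hc, hpre⟩
    exact ⟨c, hc, p, hp, Or.inl hpre⟩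
  · rw [pvBCompLoop_iff]
    constructor
    · rintro ⟨c, hc, p, hp, hpre, -⟩
      exact ⟨c, hc, p, hp, Or.inr hpre⟩
    · rintro ⟨c, hc, p, hp, hrel⟩
      rcases hrel with hpre | hpre
      · exact absurd ((pvBPubLoop_iff cs ps).mpr ⟨p, hp, c, hc, hpre⟩) h1
      · rcases Nat.lt_or_ge p.toList.length c.toList.length with hlt | hge
        · exact ⟨c, hc, p, hp, hpre, hlt⟩
        · have hceq : p = c := String.toList_inj.mp (List.IsPrefix.eq_of_length_le hpre hge)
          subst hceq
          exact absurd ((pvBPubLoop_iff cs ps).mpr ⟨p, hp, p, hc, List.prefix_refl _⟩) h1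

-- ===== VERDICT (by name: the statement is the Claim_ definition above) =====
theorem check_if_publication_is_in_your_region_spec : Claim_equal_check_if_publication_is_in_your_region := by
  intro cs ps _
  unfold Spec_check_if_publication_is_in_your_region
  exact Bool.eq_iff_iff.mpr ((pvA_iff cs ps).trans (pvB_iff cs ps).symm)
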